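-- pv_equiv track=rewrite | github.com/Thomas-Kyaw/python-test | gbfs.py | get_path_directions
-- ===== SOURCE A (Python) =====
-- def get_path_directions(path):
--     directions = []
--     for i in range(len(path) - 1):
--         current_node, next_node = path[i], path[i + 1]
--         dx, dy = next_node[0] - current_node[0], next_node[1] - current_node[1]
--         if dx == 0 and dy == -1:
--             directions.append('up')
--         elif dx == 0 and dy == 1:
--             directions.append('down')
--         elif dx == -1 and dy == 0:
--             directions.append('left')
--         elif dx == 1 and dy == 0:
--             directions.append('right')
--     return directions
-- ===== SOURCE B (Python) =====
-- def get_path_directions(path):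
--     def go(cur, rest):
--         if not rest:
--             return []
--         nxt = rest[0]
--         tail = go(nxt, rest[1:])
--         dx, dy = nxt[0] - cur[0], nxt[1] - cur[1]
--         if dx == 0 and dy * dy == 1:
--             return [('up' if dy < 0 else 'down')] + tail
--         if dy == 0 and dx * dx == 1:
--             return [('left' if dx < 0 else 'right')] + tail
--         return tail
--     return [] if not path else go(path[0], path[1:])
-- ===== Notes on version B (the rewrite author's own statement) =====
-- stated objective: alternative
-- what changed: Replaces A's index loop over range(len-1) with a four-branch equality chain appending to an accumulator by a structural recursion over the list that builds the result front-to-back, dispatching first on which axis moves (unit-step test via dy*dy==1 / dx*dx==1) and then on the sign of the step.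
import Mathlib
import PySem

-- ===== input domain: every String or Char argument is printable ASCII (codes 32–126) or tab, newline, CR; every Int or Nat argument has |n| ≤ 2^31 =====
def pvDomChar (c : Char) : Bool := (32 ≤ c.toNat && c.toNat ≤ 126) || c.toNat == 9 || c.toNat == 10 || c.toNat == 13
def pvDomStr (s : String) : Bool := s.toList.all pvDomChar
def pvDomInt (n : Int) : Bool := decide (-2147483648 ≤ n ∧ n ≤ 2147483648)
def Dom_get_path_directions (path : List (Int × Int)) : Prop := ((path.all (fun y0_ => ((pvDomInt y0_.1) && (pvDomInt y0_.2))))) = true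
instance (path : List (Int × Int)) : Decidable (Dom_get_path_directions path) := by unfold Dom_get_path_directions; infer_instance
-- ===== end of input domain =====

-- B replaces A's index loop with appending if/elif chain by a structural recursion over
-- the list building the result front-to-back, dispatching on the moving axis then on the
-- step's sign (alternative decomposition; same cost).

-- ===== PORT A =====
-- loop body of 'for i in range(len(path) - 1)'
def pvStepA (path : List (Int × Int)) (acc : List String) (i : Int) : List String :=
  match PySem.List.pyGet? path i, PySem.List.pyGet? path (i + 1) with
  | some current_node, some next_node =>
      let dx := next_node.1 - current_node.1
      let dy := next_node.2 - current_node.2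
      if dx = 0 ∧ dy = -1 then acc ++ ["up"]
      else if dx = 0 ∧ dy = 1 then acc ++ ["down"]
      else if dx = -1 ∧ dy = 0 then acc ++ ["left"]
      else if dx = 1 ∧ dy = 0 then acc ++ ["right"]
      else acc
  | _, _ => acc  -- IndexError; unreachable since i, i+1 are in range

def get_path_directions (path : List (Int × Int)) : List String :=
  (PySem.List.pyRange 0 ((path.length : Int) - 1) 1).foldl (pvStepA path) []

-- ===== PORT B =====
-- Source B's inner 'go(cur, rest)': structural recursion on rest
def pvGo (cur : Int × Int) : List (Int × Int) → List String
  | [] => []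
  | nxt :: rest =>
      let tail := pvGo nxt rest
      let dx := nxt.1 - cur.1
      let dy := nxt.2 - cur.2
      if dx = 0 ∧ dy * dy = 1 then (if dy < 0 then "up" else "down") :: tail
      else if dy = 0 ∧ dx * dx = 1 then (if dx < 0 then "left" else "right") :: tail
      else tail

def get_path_directions_alt (path : List (Int × Int)) : List String :=
  match path with
  | [] => []
  | a :: rest => pvGo a rest

-- ===== PRECONDITION & SPEC =====
def Spec_get_path_directions (path : List (Int × Int)) (out : List String) : Prop := out = get_path_directions_alt path
instance (path : List (Int × Int)) (out : List String) : Decidable (Spec_get_path_directions path out) := by unfold Spec_get_path_directions; infer_instance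

-- ===== CLAIM (what is proved, stated in full; the proofs are below) =====
def Claim_equal_get_path_directions : Prop := ∀ (path : List (Int × Int)), Dom_get_path_directions path → Spec_get_path_directions path (get_path_directions path)

-- ===== LEMMAS AND PROOFS =====

-- the ≤1-element fragment B's head decision contributes
def pvFrag (c n : Int × Int) : List String :=
  let dx := n.1 - c.1
  let dy := n.2 - c.2
  if dx = 0 ∧ dy * dy = 1 then [if dy < 0 then "up" else "down"]
  else if dy = 0 ∧ dx * dx = 1 then [if dx < 0 then "left" else "right"]
  else []

theorem pvGo_cons (c n : Int × Int) (rest : List (Int × Int)) :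
    pvGo c (n :: rest) = pvFrag c n ++ pvGo n rest := by
  simp only [pvGo, pvFrag]
  split_ifs <;> simp

-- one pair: A's if/elif chain agrees with B's head fragment
theorem pvStep_eq (c n : Int × Int) (acc : List String) :
    pvStepA [c, n] acc 0 = acc ++ pvFrag c n := by
  simp only [pvStepA, pvFrag, PySem.List.pyGet?, PySem.List.pyIdx?]
  norm_num
  have hy : n.2 - c.2 = -1 ∨ n.2 - c.2 = 1 ↔ (n.2 - c.2) * (n.2 - c.2) = 1 := by
    rw [mul_self_eq_one_iff]; tauto
  have hx : n.1 - c.1 = -1 ∨ n.1 - c.1 = 1 ↔ (n.1 - c.1) * (n.1 - c.1) = 1 := by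
    rw [mul_self_eq_one_iff]; tauto
  split_ifs with h1 h2 h3 h4 <;> simp_all <;> omega

-- the loop body only looks at the two fetched elements
theorem pvStepA_congr (path path' : List (Int × Int)) (i i' : Int) (acc : List String)
    (h1 : PySem.List.pyGet? path i = PySem.List.pyGet? path' i')
    (h2 : PySem.List.pyGet? path (i + 1) = PySem.List.pyGet? path' (i' + 1)) :
    pvStepA path acc i = pvStepA path' acc i' := by
  simp only [pvStepA, h1, h2]

theorem pv_fold_acc (l : List Int) (path : List (Int × Int)) (acc : List String) :
    l.foldl (pvStepA path) acc = acc ++ l.foldl (pvStepA path) [] := by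
  induction l generalizing acc with
  | nil => simp
  | cons i t ih =>
    simp only [List.foldl_cons]
    rw [ih, ih (pvStepA path [] i)]
    have : ∀ a, pvStepA path a i = a ++ pvStepA path [] i := by
      intro a
      cases h1 : PySem.List.pyGet? path i with
      | none => simp [pvStepA, h1]
      | some c =>
        cases h2 : PySem.List.pyGet? path (i + 1) with
        | none => simp [pvStepA, h1, h2]
        | some n => simp only [pvStepA, h1, h2]; split_ifs <;> simp
    rw [this acc, List.append_assoc]

theorem pv_main (path : List (Int × Int)) :
    get_path_directions path = get_path_directions_alt path := by
  induction path with
  | nil => rfl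
  | cons a t ih =>
    cases t with
    | nil => rfl
    | cons b t' =>
      -- A side: split off index 0, shift the rest
      have hlen : (0 : Int) < ((a :: b :: t').length : Int) - 1 := by
        simp only [List.length_cons]; push_cast; omega
      rw [get_path_directions, PySem.List.pyRange_one_cons hlen, List.foldl_cons,
        pv_fold_acc]
      -- the remaining indices 1 .. len-1 on (a::b::t') behave as 0 .. len-2 on (b::t')
      have hshift : PySem.List.pyRange 1 ((((a :: b :: t').length : Int)) - 1) 1 =
          (PySem.List.pyRange 0 ((((b :: t').length : Int)) - 1) 1).map (· + 1) := by
        rw [PySem.List.pyRange_one, PySem.List.pyRange_one, List.map_map]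
        have hn : ((((a :: b :: t').length : Int) - 1) - 1).toNat =
            ((((b :: t').length : Int) - 1) - 0).toNat := by
          simp only [List.length_cons]; omega
        rw [hn]
        apply List.map_congr_left
        intro x _
        simp only [Function.comp_apply]
        ring
      have hfold : ∀ l : List Int, (∀ i ∈ l, 0 ≤ i) →
          (l.map (· + 1)).foldl (pvStepA (a :: b :: t')) [] =
          l.foldl (pvStepA (b :: t')) [] := by
        intro l
        induction l with
        | nil => intro _; rfl
        | cons i t ih2 =>
          intro hmem
          have hi : 0 ≤ i := hmem i (by simp)
          simp only [List.map_cons, List.foldl_cons]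
          rw [pv_fold_acc _ (a :: b :: t'), pv_fold_acc _ (b :: t'),
            ih2 (fun j hj => hmem j (by simp [hj]))]
          congr 1
          apply pvStepA_congr
          · obtain ⟨k, rfl⟩ := Int.eq_ofNat_of_zero_le hi
            exact PySem.List.pyGet?_cons_succ a (b :: t') k
          · obtain ⟨k, rfl⟩ := Int.eq_ofNat_of_zero_le hi
            rw [show ((k : Int) + 1) = ((k + 1 : Nat) : Int) by push_cast; ring]
            exact PySem.List.pyGet?_cons_succ a (b :: t') (k + 1)
      rw [show (0 : Int) + 1 = 1 from rfl] at *
      rw [hshift, hfold _ (by intro i hi; exact (PySem.List.mem_pyRange_one.mp hi).1)]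
      -- head step equals B's head fragment on (a, b)
      have hhead : pvStepA (a :: b :: t') [] 0 = pvFrag a b := by
        have h := pvStep_eq a b []
        simp only [List.nil_append] at h
        rw [← h]
        apply pvStepA_congr
        · rw [PySem.List.pyGet?_zero_cons, PySem.List.pyGet?_zero_cons]
        · rw [show (0 : Int) + 1 = ((0 : Nat) : Int) + 1 by norm_num,
            PySem.List.pyGet?_cons_succ a (b :: t') 0, PySem.List.pyGet?_cons_succ a [b] 0,
            show ((0 : Nat) : Int) = 0 from rfl,
            PySem.List.pyGet?_zero_cons, PySem.List.pyGet?_zero_cons]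
      rw [hhead, ← get_path_directions, ih]
      -- B side on a :: b :: t'
      show pvFrag a b ++ get_path_directions_alt (b :: t') = get_path_directions_alt (a :: b :: t')
      rw [show get_path_directions_alt (a :: b :: t') = pvGo a (b :: t') from rfl,
        pvGo_cons]
      rfl

-- ===== VERDICT (by name: the statement is the Claim_ definition above) =====
theorem get_path_directions_spec : Claim_equal_get_path_directions := by
  intro path _
  exact pv_main path
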